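-- pv_equiv track=rewrite | github.com/lizihe1120-gif/Prefix-Reversal-Sort-Algorithm-Implementation | pr_sorter.py | pr_binary_sort
-- ===== SOURCE A (Python) =====
-- def pr_binary_sort(arr: list[int]) -> list[int]:
--     """
--     Sorts binary sequences using prefix reversals
--
--     Algorithm Overview:
--     1.If last element is 0,reverse entire array to move zeros to beginning
--     2.Scan for transitions between 0 and 1, performing reversals at each transition
--     3.Each reversal at a transition point extends the sorted prefix
--     """
--     #Create working copy
--     a =arr[:]
--     n =len(a)
--     result =[]
--     #Step 1: Handle case where last element is 0
--     if a[-1]==0: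
--         result.append(n-1)
--         reverse_prefix(a,n-1)
--     #Step 2:Scan for transitions between 0 and 1
--     for i in range(n-1):
--         if a[i] !=a[i+1]:
--             result.append(i)
--             reverse_prefix(a,i)
--     if a[-1] !=1:
--         result.append(n-1)
--     return result
--
-- def reverse_prefix(arr, i):
--     """
--     Reverse the prefix of array up to index i.
--
--     """
--     arr[0:i+1] =arr[i::-1]
-- ===== SOURCE B (Python) =====
-- def pr_binary_sort(arr: list[int]) -> list[int]:
--     # One pass: reversals at increasing indices never touch positions still to be
--     # scanned, so all transition indices can be read off the (possibly reversed)
--     # input directly, without performing any prefix reversal.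
--     n = len(arr)
--     last_zero = arr[-1] == 0
--     b = list(reversed(arr)) if last_zero else arr
--     head = [n - 1] if last_zero else []
--     trans = [i for i in range(n - 1) if b[i] != b[i + 1]]
--     tail = [n - 1] if b[-1] != 1 else []
--     return head + trans + tail
-- ===== Notes on version B (the rewrite author's own statement) =====
-- stated objective: faster
-- what changed: B never performs the O(n) prefix reversals of the scan loop: since a reversal at index i only touches positions <= i, all transition indices are read in one pass directly off the (possibly reversed) input, giving O(n) instead of O(n^2).
import Mathlib
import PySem

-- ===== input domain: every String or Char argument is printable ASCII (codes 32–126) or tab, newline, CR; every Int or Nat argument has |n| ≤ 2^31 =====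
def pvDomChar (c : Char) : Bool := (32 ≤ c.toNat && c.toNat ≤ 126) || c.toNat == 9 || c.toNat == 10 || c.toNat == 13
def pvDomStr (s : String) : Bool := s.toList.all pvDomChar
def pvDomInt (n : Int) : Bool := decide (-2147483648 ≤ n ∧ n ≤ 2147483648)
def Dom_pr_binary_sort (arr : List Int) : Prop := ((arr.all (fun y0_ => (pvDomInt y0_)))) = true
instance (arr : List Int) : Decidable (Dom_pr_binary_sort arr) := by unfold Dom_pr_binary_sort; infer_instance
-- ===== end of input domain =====

-- B avoids performing the O(n) prefix reversals: every reversal in A's scan only touches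
-- already-passed positions, so B reads all transition indices in one pass (O(n) vs O(n^2)).

-- ===== PORT A =====
-- reverse_prefix(arr, i): replaces the first i+1 elements by their reverse.  Exact for the in-range i this
-- program always calls it with (step 1 uses the full length, the loop uses scan indices).
def revPrefix (a : List Int) (i : Nat) : List Int :=
  (a.take (i + 1)).reverse ++ a.drop (i + 1)

-- the 'for i in range(n-1)' loop of A, threading the mutable state (a, result)
def loopA : List Int × List Int → List Nat → List Int × List Int
  | st, [] => st
  | (a, res), i :: rest =>
      loopA (if a.getD i 0 ≠ a.getD (i + 1) 0
             then (revPrefix a i, res ++ [(i : Int)])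
             else (a, res)) rest

def pr_binary_sort (arr : List Int) : List Int :=
  let a := arr
  let n := a.length
  let result : List Int := []
  -- last element (Python raises IndexError on the empty list, excluded by Pre_)
  let st0 : List Int × List Int :=
    if PySem.List.pyGetD a (-1) 0 = 0
    then (revPrefix a (n - 1), result ++ [(n : Int) - 1])
    else (a, result)
  let st1 := loopA st0 (List.range (n - 1))  -- for i in range(n - 1)
  if PySem.List.pyGetD st1.1 (-1) 0 ≠ 1 then st1.2 ++ [(n : Int) - 1] else st1.2

-- ===== PORT B =====
def pr_binary_sort_alt (arr : List Int) : List Int :=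
  let n := arr.length
  let lastZero := PySem.List.pyGetD arr (-1) 0 = 0   -- last element == 0 (empty list excluded by Pre_)
  let b := if lastZero then arr.reverse else arr
  let head := if lastZero then [(n : Int) - 1] else []
  let trans := (List.range (n - 1)).filterMap
    (fun i => if b.getD i 0 ≠ b.getD (i + 1) 0 then some ((i : Int)) else none)
  let tail := if PySem.List.pyGetD b (-1) 0 ≠ 1 then [(n : Int) - 1] else []
  head ++ trans ++ tail

-- ===== PRECONDITION & SPEC =====
-- Pre_ excludes only the empty list, on which both Pythons raise IndexError at arr[-1].
def Pre_pr_binary_sort (arr : List Int) : Prop := arr ≠ []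
instance (arr : List Int) : Decidable (Pre_pr_binary_sort arr) := by
  unfold Pre_pr_binary_sort; infer_instance

def pvWitness_pr_binary_sort : List Int := [1, 0, 0, 1, 0]

def Spec_pr_binary_sort (arr : List Int) (out : List Int) : Prop := out = pr_binary_sort_alt arr
instance (arr : List Int) (out : List Int) : Decidable (Spec_pr_binary_sort arr out) := by
  unfold Spec_pr_binary_sort; infer_instance

-- ===== CLAIM (what is proved, stated in full; the proofs are below) =====
def Claim_equal_pr_binary_sort : Prop := ∀ (arr : List Int), Dom_pr_binary_sort arr → Pre_pr_binary_sort arr → Spec_pr_binary_sort arr (pr_binary_sort arr)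

-- ===== LEMMAS AND PROOFS =====

theorem getD_eq_of_drop_eq {a b : List Int} {k j : Nat}
    (h : a.drop k = b.drop k) (hj : k ≤ j) : a.getD j 0 = b.getD j 0 := by
  have hja : a[j]? = (a.drop k)[j - k]? := by
    rw [List.getElem?_drop]; congr 1; omega
  have hjb : b[j]? = (b.drop k)[j - k]? := by
    rw [List.getElem?_drop]; congr 1; omega
  simp [List.getD, hja, hjb, h]

theorem length_revPrefix (a : List Int) (i : Nat) :
    (revPrefix a i).length = a.length := by
  simp [revPrefix]; omega

theorem drop_revPrefix {a : List Int} {i : Nat} (h : i + 1 ≤ a.length) :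
    (revPrefix a i).drop (i + 1) = a.drop (i + 1) := by
  unfold revPrefix
  rw [List.drop_append_of_le_length (by simp; omega)]
  simp [Nat.min_eq_left h]

theorem revPrefix_full {a : List Int} (h : a ≠ []) :
    revPrefix a (a.length - 1) = a.reverse := by
  have hl : 0 < a.length := List.length_pos_of_ne_nil h
  unfold revPrefix
  rw [Nat.sub_add_cancel hl]
  simp

theorem loopA_inv (b : List Int) : ∀ (m k : Nat) (a res : List Int),
    a.length = b.length → k + m ≤ b.length → a.drop k = b.drop k →
    ∃ a', loopA (a, res) (List.range' k m) =
        (a', res ++ (List.range' k m).filterMap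
          (fun i => if b.getD i 0 ≠ b.getD (i + 1) 0 then some ((i : Int)) else none))
      ∧ a'.drop (k + m) = b.drop (k + m) ∧ a'.length = b.length := by
  intro m
  induction m with
  | zero =>
    intro k a res hlen hle hdrop
    exact ⟨a, by simp [loopA], hdrop, hlen⟩
  | succ m ih =>
    intro k a res hlen hle hdrop
    rw [List.range'_succ]
    have hk : a.getD k 0 = b.getD k 0 := getD_eq_of_drop_eq hdrop le_rfl
    have hk1 : a.getD (k + 1) 0 = b.getD (k + 1) 0 := getD_eq_of_drop_eq hdrop (by omega)
    have hdrop1 : a.drop (k + 1) = b.drop (k + 1) := by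
      have ha : a.drop (k + 1) = (a.drop k).drop 1 := by rw [List.drop_drop]
      have hb : b.drop (k + 1) = (b.drop k).drop 1 := by rw [List.drop_drop]
      rw [ha, hb, hdrop]
    by_cases hc : b.getD k 0 = b.getD (k + 1) 0
    · -- no transition at k: state unchanged
      have hac : a.getD k 0 = a.getD (k + 1) 0 := by rw [hk, hk1]; exact hc
      obtain ⟨a', heq, hd, hl⟩ := ih (k + 1) a res hlen (by omega) hdrop1
      refine ⟨a', ?_, by rw [show k + (m + 1) = k + 1 + m by omega]; exact hd, hl⟩
      simp only [loopA]
      have hfk : (if b.getD k 0 ≠ b.getD (k + 1) 0 then some ((k : Int)) else none) = none :=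
        if_neg (not_not_intro hc)
      rw [if_neg (not_not_intro hac), heq, List.filterMap_cons, hfk]
    · -- transition at k: prefix reversal, which preserves the suffix from k+1
      have hlen' : (revPrefix a k).length = b.length := by rw [length_revPrefix]; exact hlen
      have hdrop' : (revPrefix a k).drop (k + 1) = b.drop (k + 1) := by
        rw [drop_revPrefix (by omega), hdrop1]
      obtain ⟨a', heq, hd, hl⟩ := ih (k + 1) (revPrefix a k) (res ++ [(k : Int)]) hlen' (by omega) hdrop'
      refine ⟨a', ?_, by rw [show k + (m + 1) = k + 1 + m by omega]; exact hd, hl⟩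
      simp only [loopA]
      have hfk : (if b.getD k 0 ≠ b.getD (k + 1) 0 then some ((k : Int)) else none) = some (k : Int) :=
        if_pos hc
      rw [if_pos (by rw [hk, hk1]; exact hc), heq, List.filterMap_cons, hfk]
      simp

theorem getD_last_eq {a b : List Int} (hlen : a.length = b.length)
    (h : a.drop (b.length - 1) = b.drop (b.length - 1)) (hb : b ≠ []) :
    PySem.List.pyGetD a (-1) 0 = PySem.List.pyGetD b (-1) 0 := by
  have ha : a ≠ [] := by
    intro hnil; rw [hnil] at hlen
    exact hb (List.eq_nil_of_length_eq_zero hlen.symm)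
  rw [PySem.List.pyGetD_neg_one a 0 ha, PySem.List.pyGetD_neg_one b 0 hb]
  have h1 : a.getLast ha = a.getD (a.length - 1) 0 := by
    have := List.length_pos_of_ne_nil ha
    rw [List.getD_eq_getElem a 0 (by omega), List.getLast_eq_getElem]
  have h2 : b.getLast hb = b.getD (b.length - 1) 0 := by
    have := List.length_pos_of_ne_nil hb
    rw [List.getD_eq_getElem b 0 (by omega), List.getLast_eq_getElem]
  rw [h1, h2, hlen]
  exact getD_eq_of_drop_eq h le_rfl

-- ===== VERDICT (by name: the statement is the Claim_ definition above) =====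
theorem pr_binary_sort_spec : Claim_equal_pr_binary_sort := by
  intro arr _ hpre
  unfold Spec_pr_binary_sort pr_binary_sort pr_binary_sort_alt
  have hn : 0 < arr.length := List.length_pos_of_ne_nil hpre
  -- the array after step 1, identical in the two ports
  by_cases hz : PySem.List.pyGetD arr (-1) 0 = 0
  case pos =>
    simp only [if_pos hz, List.nil_append]
    rw [revPrefix_full hpre]
    have hb : arr.reverse ≠ [] := by simpa using hpre
    obtain ⟨a', heq, hd, hl⟩ := loopA_inv arr.reverse (arr.length - 1) 0 arr.reverse
      [(arr.length : Int) - 1] (by simp) (by simp) rfl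
    rw [List.range_eq_range', heq]
    simp only [Nat.zero_add] at hd
    have hlast : PySem.List.pyGetD a' (-1) 0 = PySem.List.pyGetD arr.reverse (-1) 0 :=
      getD_last_eq (by simpa using hl) (by simpa using hd) hb
    rw [hlast]
    by_cases hf : PySem.List.pyGetD arr.reverse (-1) 0 = 1 <;> simp [hf]
  case neg =>
    simp only [if_neg hz, List.nil_append]
    obtain ⟨a', heq, hd, hl⟩ := loopA_inv arr (arr.length - 1) 0 arr [] rfl (by omega) rfl
    rw [List.range_eq_range', heq]
    simp only [Nat.zero_add] at hd
    have hlast : PySem.List.pyGetD a' (-1) 0 = PySem.List.pyGetD arr (-1) 0 :=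
      getD_last_eq hl hd hpre
    rw [hlast]
    by_cases hf : PySem.List.pyGetD arr (-1) 0 = 1 <;> simp [hf]
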